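-- pv_equiv track=rewrite | github.com/slahiri/media-agent | media_agent/agent/agent.py | _parse_generation
-- ===== SOURCE A (Python) =====
-- from typing import Annotated, Optional, Literal, TypedDict, Sequence
--
-- def _parse_generation(response: str) -> Optional[dict]:
--     """Parse generation parameters from LLM response."""
--     if "GENERATE_IMAGE" not in response:
--         return None
--
--     params = {}
--     lines = response.split("\n")
--
--     for line in lines:
--         line = line.strip()
--         if line.startswith("prompt:"):
--             params["prompt"] = line[7:].strip()
--         elif line.startswith("negative_prompt:"):
--             val = line[16:].strip()
--             if val.lower() not in ["none", ""]:
--                 params["negative_prompt"] = val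
--         elif line.startswith("resolution:"):
--             val = line[11:].strip()
--             if val.lower() not in ["none", ""]:
--                 params["resolution"] = val
--         elif line.startswith("seed:"):
--             val = line[5:].strip()
--             if val.lower() not in ["none", ""]:
--                 try:
--                     params["seed"] = int(val)
--                 except ValueError:
--                     pass
--
--     return params if params.get("prompt") else None
-- ===== SOURCE B (Python) =====
-- _RULES = {"prompt": "keep", "negative_prompt": "opt", "resolution": "opt", "seed": "int"}
--
--
-- def _parse_generation(response: str):
--     """Parse generation parameters from LLM response (table-driven)."""
--     if "GENERATE_IMAGE" not in response:
--         return None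
--
--     params = {}
--     for raw in response.split("\n"):
--         parts = raw.strip().split(":", 1)
--         if len(parts) != 2:
--             continue
--         key, rest = parts
--         rule = _RULES.get(key)
--         if rule is None:
--             continue
--         val = rest.strip()
--         if rule == "keep":
--             params[key] = val
--         elif val.lower() not in ("none", ""):
--             if rule == "opt":
--                 params[key] = val
--             else:
--                 try:
--                     params[key] = int(val)
--                 except ValueError:
--                     pass
--     return params if params.get("prompt") else None
-- ===== Notes on version B (the rewrite author's own statement) =====
-- stated objective: idiomatic
-- what changed: Replaces A's chain of hardcoded startswith checks and fixed-offset slices by a single split on the first colon plus a field-rule table mapping each key to how its value is processed (keep / drop-if-none-or-empty / int-with-try).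
import Mathlib
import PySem

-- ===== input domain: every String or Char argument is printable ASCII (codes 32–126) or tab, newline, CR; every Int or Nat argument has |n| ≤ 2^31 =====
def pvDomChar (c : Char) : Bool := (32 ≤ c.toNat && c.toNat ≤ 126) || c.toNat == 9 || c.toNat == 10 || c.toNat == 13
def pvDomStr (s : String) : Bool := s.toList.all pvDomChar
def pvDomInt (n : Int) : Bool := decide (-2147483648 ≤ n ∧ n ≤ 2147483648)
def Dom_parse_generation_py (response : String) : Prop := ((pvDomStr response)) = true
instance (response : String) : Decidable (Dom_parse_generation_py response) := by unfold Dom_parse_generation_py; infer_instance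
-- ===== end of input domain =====

-- B replaces A's chain of startswith/fixed-offset-slice branches by one split on the first colon plus a
-- field-rule table looked up by key (idiomatic, same cost). Python's dict value for "seed" is an int;
-- under the String-valued convention both ports store its decimal string (PySem.Int.toStr).

-- ===== PORT A =====
-- the body of A's `for line in lines` loop
def pvStepA (params : PySem.Dict String String) (line0 : String) : PySem.Dict String String :=
  let line := PySem.Str.strip line0
  if PySem.Str.startswith line "prompt:" then
    params.insert "prompt" (PySem.Str.strip (PySem.Str.slice line (some 7) none))
  else if PySem.Str.startswith line "negative_prompt:" then
    let val := PySem.Str.strip (PySem.Str.slice line (some 16) none)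
    if PySem.Str.lower val == "none" || PySem.Str.lower val == "" then params
    else params.insert "negative_prompt" val
  else if PySem.Str.startswith line "resolution:" then
    let val := PySem.Str.strip (PySem.Str.slice line (some 11) none)
    if PySem.Str.lower val == "none" || PySem.Str.lower val == "" then params
    else params.insert "resolution" val
  else if PySem.Str.startswith line "seed:" then
    let val := PySem.Str.strip (PySem.Str.slice line (some 5) none)
    if PySem.Str.lower val == "none" || PySem.Str.lower val == "" then params
    else
      match PySem.Int.ofStr? val with
      | some n => params.insert "seed" (PySem.Int.toStr n)  -- int(val); stored as its decimal string
      | none => params                                       -- except ValueError: pass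
  else params

def parse_generation_py (response : String) : Option (List (String × String)) :=
  if PySem.Str.isIn "GENERATE_IMAGE" response = false then none
  else
    let lines := (PySem.Str.split? response "\n").getD []   -- sep "\n" ≠ "", split? never none
    let params := lines.foldl pvStepA PySem.Dict.empty
    if params.getD "prompt" "" != "" then some params.items else none

-- ===== PORT B =====
def pvRules : PySem.Dict String String :=
  PySem.Dict.ofList [("prompt", "keep"), ("negative_prompt", "opt"), ("resolution", "opt"), ("seed", "int")]

-- the body of B's loop: split once on ':', look the key up in the rule table
def pvStepB (params : PySem.Dict String String) (raw : String) : PySem.Dict String String :=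
  match PySem.Str.splitMax? (PySem.Str.strip raw) ":" 1 with
  | some [key, rest] =>
    match pvRules.get? key with
    | some rule =>
      let val := PySem.Str.strip rest
      if rule == "keep" then params.insert key val
      else if PySem.Str.lower val == "none" || PySem.Str.lower val == "" then params
      else if rule == "opt" then params.insert key val
      else
        match PySem.Int.ofStr? val with
        | some n => params.insert key (PySem.Int.toStr n)
        | none => params
    | none => params
  | _ => params

def parse_generation_py_alt (response : String) : Option (List (String × String)) :=
  if PySem.Str.isIn "GENERATE_IMAGE" response = false then none
  else
    let lines := (PySem.Str.split? response "\n").getD []   -- sep "\n" ≠ "", split? never none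
    let params := lines.foldl pvStepB PySem.Dict.empty
    if params.getD "prompt" "" != "" then some params.items else none

-- ===== PRECONDITION & SPEC =====
def Spec_parse_generation_py (response : String) (out : Option (List (String × String))) : Prop := out = parse_generation_py_alt response
instance (response : String) (out : Option (List (String × String))) : Decidable (Spec_parse_generation_py response out) := by unfold Spec_parse_generation_py; infer_instance

-- ===== CLAIM (what is proved, stated in full; the proofs are below) =====
def Claim_equal_parse_generation_py : Prop := ∀ (response : String), Dom_parse_generation_py response → Spec_parse_generation_py response (parse_generation_py response)

-- ===== LEMMAS AND PROOFS =====

theorem pvGo_m0 : ∀ (fuel : Nat) (l : List Char) (acc : List (List Char)),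
    PySem.Chars.splitOnMax.go [':'] fuel 0 l [] acc = (l :: acc).reverse := by
  intro fuel
  induction fuel with
  | zero => intro l acc; simp [PySem.Chars.splitOnMax.go]
  | succ n ih => intro l acc; cases l with
    | nil => simp [PySem.Chars.splitOnMax.go]
    | cons c rest => simp [PySem.Chars.splitOnMax.go]

theorem pvGo1 : ∀ (fuel : Nat) (cs cur : List Char) (acc : List (List Char)),
    cs.length ≤ fuel →
    PySem.Chars.splitOnMax.go [':'] fuel 1 cs cur acc =
      (if ':' ∈ cs then
        ((cs.dropWhile (· != ':')).tail :: (cur.reverse ++ cs.takeWhile (· != ':')) :: acc).reverse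
      else ((cur.reverse ++ cs) :: acc).reverse) := by
  intro fuel
  induction fuel with
  | zero =>
    intro cs cur acc h
    have : cs = [] := List.eq_nil_of_length_eq_zero (Nat.le_zero.mp h)
    subst this; simp [PySem.Chars.splitOnMax.go]
  | succ n ih =>
    intro cs cur acc h
    cases cs with
    | nil => simp [PySem.Chars.splitOnMax.go]
    | cons c rest =>
      by_cases hc : c = ':'
      · subst hc
        simp only [PySem.Chars.splitOnMax.go]
        simp [pvGo_m0]
      · have hpre : [':'].isPrefixOf (c :: rest) = false := by
          simp [List.isPrefixOf]; exact fun h' => (hc h'.symm).elim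
        simp only [PySem.Chars.splitOnMax.go]
        rw [ih rest (c :: cur) acc (by simpa using Nat.le_of_succ_le_succ h)]
        by_cases hm : ':' ∈ rest <;>
          simp [hm, hc, hpre, Ne.symm hc]

theorem pvSplitColon (cs : List Char) :
    PySem.Chars.splitOnMax cs [':'] 1 =
      (if ':' ∈ cs then [cs.takeWhile (· != ':'), (cs.dropWhile (· != ':')).tail] else [cs]) := by
  unfold PySem.Chars.splitOnMax
  rw [if_neg (by omega)]
  rw [show (1 : Int).toNat = 1 from rfl]
  rw [pvGo1 (cs.length + 1) cs [] [] (by omega)]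
  by_cases hm : ':' ∈ cs <;> simp [hm]

theorem pvDecomp (L : List Char) (h : ':' ∈ L) :
    L = L.takeWhile (· != ':') ++ ':' :: (L.dropWhile (· != ':')).tail := by
  induction L with
  | nil => cases h
  | cons c rest ih =>
    by_cases hc : c = ':'
    · subst hc; simp
    · have : ':' ∈ rest := by cases h with | head => exact absurd rfl hc | tail _ h => exact h
      simp only [List.takeWhile_cons, List.dropWhile_cons,
        show (c != ':') = true by simp [hc], if_true, List.cons_append]
      exact congrArg (c :: ·) (ih this)

theorem pvTakeWhileAppend (K t : List Char) (hK : ':' ∉ K) :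
    (K ++ ':' :: t).takeWhile (· != ':') = K := by
  induction K with
  | nil => simp
  | cons c rest ih =>
    have hc : c ≠ ':' := fun h => hK (h ▸ List.mem_cons_self)
    simp only [List.cons_append, List.takeWhile_cons]
    simp [hc, ih (fun h => hK (List.mem_cons_of_mem _ h))]

theorem pvSw_iff (L K : List Char) (hK : ':' ∉ K) :
    PySem.Chars.startswith L (K ++ [':']) = true ↔ (':' ∈ L ∧ L.takeWhile (· != ':') = K) := by
  constructor
  · intro h
    have hpre : (K ++ [':']) <+: L := by
      simpa [PySem.Chars.startswith, List.isPrefixOf_iff_prefix] using h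
    obtain ⟨t, ht⟩ := hpre
    subst ht
    refine ⟨by simp, ?_⟩
    simpa using pvTakeWhileAppend K t hK
  · rintro ⟨hm, htw⟩
    have hd := pvDecomp L hm
    rw [htw] at hd
    have hp : (K ++ [':']) <+: L := by
      refine ⟨(L.dropWhile (· != ':')).tail, ?_⟩
      generalize (L.dropWhile (· != ':')).tail = t at hd ⊢
      rw [hd]; simp
    simpa [PySem.Chars.startswith, List.isPrefixOf_iff_prefix] using hp

theorem pvRest_eq (L K : List Char) (_hK : ':' ∉ K) (hc : ':' ∈ L) (ht : L.takeWhile (· != ':') = K) :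
    (L.dropWhile (· != ':')).tail = L.drop (K.length + 1) := by
  have hd := pvDecomp L hc
  rw [ht] at hd
  conv_rhs => rw [hd]
  simp [List.drop_append]

theorem pvSwTrue (L : String) (K : List Char) (P : String) (hP : P.toList = K ++ [':'])
    (hK : ':' ∉ K) (hm : ':' ∈ L.toList) (htw : L.toList.takeWhile (· != ':') = K) :
    PySem.Str.startswith L P = true := by
  rw [PySem.Str.startswith_eq, hP]
  exact (pvSw_iff L.toList K hK).mpr ⟨hm, htw⟩

theorem pvSwFalse (L : String) (K : List Char) (P : String) (hP : P.toList = K ++ [':'])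
    (hK : ':' ∉ K) (h : L.toList.takeWhile (· != ':') ≠ K) :
    PySem.Str.startswith L P = false := by
  rw [PySem.Str.startswith_eq, hP]
  rw [Bool.eq_false_iff]
  intro h'
  exact h ((pvSw_iff L.toList K hK).mp h').2

theorem pvSwFalseNoColon (L : String) (K : List Char) (P : String) (hP : P.toList = K ++ [':'])
    (hK : ':' ∉ K) (h : ':' ∉ L.toList) :
    PySem.Str.startswith L P = false := by
  rw [PySem.Str.startswith_eq, hP]
  rw [Bool.eq_false_iff]
  intro h'
  exact h ((pvSw_iff L.toList K hK).mp h').1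

theorem pvVal_eq (L rest : String) (K : List Char) (hK : ':' ∉ K) (hm : ':' ∈ L.toList)
    (htw : L.toList.takeWhile (· != ':') = K)
    (hrt : rest.toList = (L.toList.dropWhile (· != ':')).tail)
    (n : Int) (h0 : 0 ≤ n) (hn : n.toNat = K.length + 1) :
    PySem.Str.slice L (some n) none = rest := by
  apply String.toList_inj.mp
  rw [PySem.Str.toList_slice, PySem.Chars.slice_eq_listSlice, PySem.List.slice_from _ h0, hn, hrt,
    pvRest_eq L.toList K hK hm htw]

theorem pvSplitStr (L : String) :
    PySem.Str.splitMax? L ":" 1 =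
      some (if ':' ∈ L.toList then
              [String.ofList (L.toList.takeWhile (· != ':')), String.ofList ((L.toList.dropWhile (· != ':')).tail)]
            else [L]) := by
  have hbr := PySem.Str.splitMax?_map L ":" 1
  rw [show (":" : String).toList = [':'] from rfl] at hbr
  rw [show PySem.Chars.splitMax? L.toList [':'] 1 = some (PySem.Chars.splitOnMax L.toList [':'] 1) from rfl,
    pvSplitColon] at hbr
  cases hsp : PySem.Str.splitMax? L ":" 1 with
  | none => rw [hsp] at hbr; by_cases hm : ':' ∈ L.toList <;> simp [hm] at hbr
  | some xs =>
    rw [hsp] at hbr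
    by_cases hm : ':' ∈ L.toList
    · rw [if_pos hm] at hbr
      rw [if_pos hm]
      simp only [Option.map_some, Option.some.injEq] at hbr ⊢
      cases xs with
      | nil => simp at hbr
      | cons k xs' =>
        cases xs' with
        | nil => simp at hbr
        | cons r xs'' =>
          cases xs'' with
          | cons _ _ => simp at hbr
          | nil =>
            simp only [List.map_cons, List.map_nil, List.cons.injEq, and_true] at hbr
            obtain ⟨h1, h2⟩ := hbr
            rw [List.cons.injEq, List.cons.injEq]
            exact ⟨by rw [← h1, String.ofList_toList], by rw [← h2, String.ofList_toList], rfl⟩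
    · rw [if_neg hm] at hbr
      rw [if_neg hm]
      simp only [Option.map_some, Option.some.injEq] at hbr ⊢
      cases xs with
      | nil => simp at hbr
      | cons k xs' =>
        cases xs' with
        | cons _ _ => simp at hbr
        | nil =>
          simp only [List.map_cons, List.map_nil, List.cons.injEq, and_true] at hbr
          rw [List.cons.injEq]
          exact ⟨String.toList_inj.mp hbr, rfl⟩

theorem pvStep_eq (d : PySem.Dict String String) (s : String) : pvStepA d s = pvStepB d s := by
  unfold pvStepA pvStepB
  rw [pvSplitStr (PySem.Str.strip s)]
  simp only []
  set L : String := PySem.Str.strip s with hLdef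
  by_cases hm : ':' ∈ L.toList
  · rw [if_pos hm]
    set tw := L.toList.takeWhile (· != ':') with htwdef
    set tl := (L.toList.dropWhile (· != ':')).tail with htldef
    have hrt : (String.ofList tl).toList = (L.toList.dropWhile (· != ':')).tail := by
      rw [String.toList_ofList]
    by_cases h1 : tw = "prompt".toList
    · have hsw := pvSwTrue L "prompt".toList "prompt:" (by decide) (by decide) hm h1
      have hv := pvVal_eq L (String.ofList tl) "prompt".toList (by decide) hm h1 hrt 7 (by omega) (by decide)
      have hkey : String.ofList tw = "prompt" := by rw [h1, String.ofList_toList]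
      rw [hsw, hkey, hv, if_pos rfl]
      split
      next key rest h =>
        obtain ⟨hk, hr⟩ : "prompt" = key ∧ String.ofList tl = rest := by simpa using h
        subst hk hr
        rw [show pvRules.get? "prompt" = some "keep" from by decide]
        rfl
      next h => exact absurd rfl (h "prompt" (String.ofList tl))
    · have hsw1 := pvSwFalse L "prompt".toList "prompt:" (by decide) (by decide) h1
      by_cases h2 : tw = "negative_prompt".toList
      · have hsw := pvSwTrue L "negative_prompt".toList "negative_prompt:" (by decide) (by decide) hm h2
        have hv := pvVal_eq L (String.ofList tl) "negative_prompt".toList (by decide) hm h2 hrt 16 (by omega) (by decide)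
        have hkey : String.ofList tw = "negative_prompt" := by rw [h2, String.ofList_toList]
        rw [hkey, hv]
        simp only [hsw1, hsw, Bool.false_eq_true, if_false, if_true]
        split
        next _hval =>
          rw [show pvRules.get? "negative_prompt" = some "opt" from by decide]
          simp
        next _hval =>
          rw [show pvRules.get? "negative_prompt" = some "opt" from by decide]
          simp
      · have hsw2 := pvSwFalse L "negative_prompt".toList "negative_prompt:" (by decide) (by decide) h2
        by_cases h3 : tw = "resolution".toList
        · have hsw := pvSwTrue L "resolution".toList "resolution:" (by decide) (by decide) hm h3
          have hv := pvVal_eq L (String.ofList tl) "resolution".toList (by decide) hm h3 hrt 11 (by omega) (by decide)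
          have hkey : String.ofList tw = "resolution" := by rw [h3, String.ofList_toList]
          rw [hkey, hv]
          simp only [hsw1, hsw2, hsw, Bool.false_eq_true, if_false, if_true]
          split
          next _hval =>
            rw [show pvRules.get? "resolution" = some "opt" from by decide]
            simp
          next _hval =>
            rw [show pvRules.get? "resolution" = some "opt" from by decide]
            simp
        · have hsw3 := pvSwFalse L "resolution".toList "resolution:" (by decide) (by decide) h3
          by_cases h4 : tw = "seed".toList
          · have hsw := pvSwTrue L "seed".toList "seed:" (by decide) (by decide) hm h4
            have hv := pvVal_eq L (String.ofList tl) "seed".toList (by decide) hm h4 hrt 5 (by omega) (by decide)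
            have hkey : String.ofList tw = "seed" := by rw [h4, String.ofList_toList]
            rw [hkey, hv]
            simp only [hsw1, hsw2, hsw3, hsw, Bool.false_eq_true, if_false, if_true]
            split
            next _hval =>
              rw [show pvRules.get? "seed" = some "int" from by decide]
              simp
            next _hval =>
              rw [show pvRules.get? "seed" = some "int" from by decide]
              simp
          · have hsw4 := pvSwFalse L "seed".toList "seed:" (by decide) (by decide) h4
            have hg : pvRules.get? (String.ofList tw) = none := by
              have e1 : (("prompt" : String) == String.ofList tw) = false := by
                simp only [beq_eq_false_iff_ne]; intro hh; exact h1 (by rw [hh, String.toList_ofList])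
              have e2 : (("negative_prompt" : String) == String.ofList tw) = false := by
                simp only [beq_eq_false_iff_ne]; intro hh; exact h2 (by rw [hh, String.toList_ofList])
              have e3 : (("resolution" : String) == String.ofList tw) = false := by
                simp only [beq_eq_false_iff_ne]; intro hh; exact h3 (by rw [hh, String.toList_ofList])
              have e4 : (("seed" : String) == String.ofList tw) = false := by
                simp only [beq_eq_false_iff_ne]; intro hh; exact h4 (by rw [hh, String.toList_ofList])
              rw [show pvRules = PySem.Dict.mk [("prompt", "keep"), ("negative_prompt", "opt"),
                    ("resolution", "opt"), ("seed", "int")] from by decide]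
              rw [PySem.Dict.get?_mk_cons, e1, PySem.Dict.get?_mk_cons, e2,
                PySem.Dict.get?_mk_cons, e3, PySem.Dict.get?_mk_cons, e4]
              rfl
            simp only [hsw1, hsw2, hsw3, hsw4, Bool.false_eq_true, if_false]
            split
            next rule h => rw [hg] at h; cases h
            next h => rfl

  · have hsw1 := pvSwFalseNoColon L "prompt".toList "prompt:" (by decide) (by decide) hm
    have hsw2 := pvSwFalseNoColon L "negative_prompt".toList "negative_prompt:" (by decide) (by decide) hm
    have hsw3 := pvSwFalseNoColon L "resolution".toList "resolution:" (by decide) (by decide) hm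
    have hsw4 := pvSwFalseNoColon L "seed".toList "seed:" (by decide) (by decide) hm
    rw [if_neg hm]
    simp only [hsw1, hsw2, hsw3, hsw4, Bool.false_eq_true, if_false]

-- ===== VERDICT (by name: the statement is the Claim_ definition above) =====
theorem parse_generation_py_spec : Claim_equal_parse_generation_py := by
  intro response _
  unfold Spec_parse_generation_py parse_generation_py parse_generation_py_alt
  rw [funext fun d => funext fun s => pvStep_eq d s]
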